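-- pv_equiv track=rewrite | github.com/FREDYASARMIENTOT/SLNFIS_4 | PORTAL_FIS/utils/loader_oferta.py | _detectar_columna
-- ===== SOURCE A (Python) =====
-- def _normalizar(col: str) -> str:
--     """Normaliza un nombre de columna para comparación robusta."""
--     return (col.upper()
--                .strip()
--                .replace("Á", "A").replace("É", "E").replace("Í", "I")
--                .replace("Ó", "O").replace("Ú", "U").replace("Ü", "U"))
--
-- def _detectar_columna(columnas: list[str], variantes: list[str]) -> str | None:
--     """Busca la primera columna que coincida con alguna variante normalizada."""
--     norm_cols = {_normalizar(c): c for c in columnas}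
--     norm_vars_set = {_normalizar(v) for v in variantes}
--     for nk, orig in norm_cols.items():
--         if nk in norm_vars_set:
--             return orig
--     # Búsqueda parcial como fallback
--     for nk, orig in norm_cols.items():
--         for v in norm_vars_set:
--             if v in nk or nk in v:
--                 return orig
--     return None
-- ===== SOURCE B (Python) =====
-- def _normalizar(col: str) -> str:
--     """Normaliza un nombre de columna para comparación robusta."""
--     return (col.upper()
--                .strip()
--                .replace("Á", "A").replace("É", "E").replace("Í", "I")
--                .replace("Ó", "O").replace("Ú", "U").replace("Ü", "U"))
--
--
-- def _detectar_columna(columnas: list[str], variantes: list[str]) -> str | None: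
--     """Single candidate-tracking pass: exact hit returns at once; the first
--     partial hit is remembered and returned only if no exact hit exists."""
--     norm_cols = {_normalizar(c): c for c in columnas}
--     norm_vars = {_normalizar(v) for v in variantes}
--     partial = None
--     for nk, orig in norm_cols.items():
--         if nk in norm_vars:
--             return orig
--         if partial is None and any(v in nk or nk in v for v in norm_vars):
--             partial = orig
--     return partial
-- ===== Notes on version B (the rewrite author's own statement) =====
-- stated objective: alternative
-- what changed: A scans the normalized-column dict twice (one pass for exact matches, a second full pass for partial substring matches); B makes a single pass that returns immediately on an exact match while remembering the first partial match in a candidate variable returned at the end.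
import Mathlib
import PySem

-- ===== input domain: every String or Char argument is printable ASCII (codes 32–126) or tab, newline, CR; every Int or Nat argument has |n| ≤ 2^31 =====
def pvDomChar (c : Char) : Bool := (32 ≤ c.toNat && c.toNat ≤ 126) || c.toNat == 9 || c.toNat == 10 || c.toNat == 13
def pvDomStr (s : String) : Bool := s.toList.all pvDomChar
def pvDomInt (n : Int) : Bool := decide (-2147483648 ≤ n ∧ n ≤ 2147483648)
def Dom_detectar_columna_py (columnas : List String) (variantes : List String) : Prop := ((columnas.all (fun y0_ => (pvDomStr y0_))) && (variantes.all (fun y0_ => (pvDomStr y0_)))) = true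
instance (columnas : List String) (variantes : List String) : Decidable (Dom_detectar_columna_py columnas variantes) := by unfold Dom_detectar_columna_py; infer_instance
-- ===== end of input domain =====

-- B fuses A's two scans (exact pass, then partial-fallback pass) into one
-- candidate-tracking pass; proved to return the same value on every input.

-- ===== PORT A =====
-- _normalizar: upper, strip, then the six accent replaces (they find nothing on ASCII input but are ported literally)
def pvNormalizar (col : String) : String :=
  PySem.Str.replace (PySem.Str.replace (PySem.Str.replace (PySem.Str.replace (PySem.Str.replace (PySem.Str.replace
    (PySem.Str.strip (PySem.Str.upper col)) "Á" "A") "É" "E") "Í" "I") "Ó" "O") "Ú" "U") "Ü" "U"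

-- {_normalizar(c): c for c in columnas}
def pvNormCols (columnas : List String) : PySem.Dict String String :=
  columnas.foldl (fun d c => d.insert (pvNormalizar c) c) PySem.Dict.empty

-- {_normalizar(v) for v in variantes}
def pvNormVars (variantes : List String) : PySem.Set String :=
  PySem.Set.ofList (variantes.map pvNormalizar)

-- first loop: exact match
def pvLoopExact (vars : PySem.Set String) : List (String × String) → Option String
  | [] => none
  | (nk, orig) :: rest =>
      if PySem.Set.contains vars nk then some orig else pvLoopExact vars rest

-- inner loop: for v in norm_vars_set: if v in nk or nk in v: return orig  (hit or not)
def pvLoopVars (nk : String) : List String → Bool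
  | [] => false
  | v :: vs => if PySem.Str.isIn v nk || PySem.Str.isIn nk v then true else pvLoopVars nk vs

-- second loop: partial fallback
def pvLoopPartial (vars : PySem.Set String) : List (String × String) → Option String
  | [] => none
  | (nk, orig) :: rest =>
      if pvLoopVars nk vars then some orig else pvLoopPartial vars rest

def detectar_columna_py (columnas : List String) (variantes : List String) : Option String :=
  let items := (pvNormCols columnas).items
  let vars := pvNormVars variantes
  match pvLoopExact vars items with
  | some orig => some orig
  | none => pvLoopPartial vars items

-- ===== PORT B =====
-- single pass: return on exact hit, remember the first partial hit in `partial`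
def pvScan (vars : PySem.Set String) : List (String × String) → Option String → Option String
  | [], part => part
  | (nk, orig) :: rest, part =>
      if PySem.Set.contains vars nk then some orig
      else pvScan vars rest
        (if part.isNone && vars.any (fun v => PySem.Str.isIn v nk || PySem.Str.isIn nk v)
         then some orig else part)

def detectar_columna_py_alt (columnas : List String) (variantes : List String) : Option String :=
  pvScan (pvNormVars variantes) ((pvNormCols columnas).items) none

-- ===== PRECONDITION & SPEC =====
def Spec_detectar_columna_py (columnas : List String) (variantes : List String) (out : Option String) : Prop := out = detectar_columna_py_alt columnas variantes
instance (columnas : List String) (variantes : List String) (out : Option String) : Decidable (Spec_detectar_columna_py columnas variantes out) := by unfold Spec_detectar_columna_py; infer_instance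

-- ===== CLAIM (what is proved, stated in full; the proofs are below) =====
def Claim_equal_detectar_columna_py : Prop := ∀ (columnas : List String) (variantes : List String), Dom_detectar_columna_py columnas variantes → Spec_detectar_columna_py columnas variantes (detectar_columna_py columnas variantes)

-- ===== LEMMAS AND PROOFS =====

-- A's hand-written inner scan over the variants is the `any` B uses
theorem pvLoopVars_eq_any (nk : String) (vs : List String) :
    pvLoopVars nk vs = vs.any (fun v => PySem.Str.isIn v nk || PySem.Str.isIn nk v) := by
  induction vs with
  | nil => rfl
  | cons v vs ih =>
    cases h : (PySem.Str.isIn v nk || PySem.Str.isIn nk v) with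
    | true => simp only [pvLoopVars, h, if_true, List.any_cons, Bool.true_or]
    | false => simp only [pvLoopVars, h, Bool.false_eq_true, if_false, List.any_cons,
        Bool.false_or, ih]

-- the candidate-tracking scan equals: exact pass first; else the pending candidate; else the partial pass
theorem pvScan_eq (vars : PySem.Set String) (items : List (String × String)) (p : Option String) :
    pvScan vars items p =
      match pvLoopExact vars items with
      | some o => some o
      | none => match p with
                | some x => some x
                | none => pvLoopPartial vars items := by
  induction items generalizing p with
  | nil => cases p <;> rfl
  | cons it rest ih =>
    obtain ⟨nk, orig⟩ := it
    by_cases hc : PySem.Set.contains vars nk = true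
    · simp only [pvScan, pvLoopExact, hc, if_true]
    · have hb : PySem.Set.contains vars nk = false := by simpa using hc
      cases p with
      | some x =>
        simp only [pvScan, pvLoopExact, pvLoopPartial, hb, Bool.false_eq_true, if_false,
          Option.isNone_some, Bool.false_and, ih]
      | none =>
        simp only [pvScan, pvLoopExact, pvLoopPartial, hb, Bool.false_eq_true, if_false,
          Option.isNone_none, Bool.true_and, ih, ← pvLoopVars_eq_any nk vars]
        by_cases hp : pvLoopVars nk vars = true
        · simp only [hp, if_true]
        · simp only [hp, Bool.false_eq_true, if_false]

-- ===== VERDICT (by name: the statement is the Claim_ definition above) =====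
theorem detectar_columna_py_spec : Claim_equal_detectar_columna_py := by
  intro columnas variantes _
  unfold Spec_detectar_columna_py detectar_columna_py detectar_columna_py_alt
  rw [pvScan_eq]
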